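-- pv_equiv track=rewrite | github.com/ostanlabs/ploston-cli | src/ploston_cli/inspector/models.py | _match_runner_mcp
-- ===== SOURCE A (Python) =====
-- def _match_runner_mcp(tool_name: str, known_mcps: set[str]) -> str | None:
--     """Extract the mcp-server prefix from a runner-surfaced tool name.
--
--     Runner-served tools are flattened by the CP as ``<mcp>__<tool>`` (and
--     occasionally ``<mcp>_<tool>``). To avoid false-positives when an MCP
--     server name happens to contain an underscore, we always prefer the
--     longest matching known server name.
--
--     Returns the mcp name if a prefix matches, else ``None``.
--     """
--     if not tool_name or not known_mcps:
--         return None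
--     # Try ``<mcp>__`` first (canonical), then ``<mcp>_`` as a fallback.
--     for sep in ("__", "_"):
--         candidates = [
--             m
--             for m in known_mcps
--             if tool_name.startswith(f"{m}{sep}") and len(tool_name) > len(m) + len(sep)
--         ]
--         if candidates:
--             return max(candidates, key=len)
--     return None
-- ===== SOURCE B (Python) =====
-- def _match_runner_mcp(tool_name: str, known_mcps: set[str]) -> str | None:
--     """Single pass over known_mcps keeping two running bests (one per separator)."""
--     if not tool_name or not known_mcps:
--         return None
--     best_dbl = None
--     best_sgl = None
--     for m in known_mcps:
--         if tool_name.startswith(m + "__") and len(tool_name) > len(m) + 2: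
--             if best_dbl is None or len(m) > len(best_dbl):
--                 best_dbl = m
--         if tool_name.startswith(m + "_") and len(tool_name) > len(m) + 1:
--             if best_sgl is None or len(m) > len(best_sgl):
--                 best_sgl = m
--     return best_dbl if best_dbl is not None else best_sgl
-- ===== Notes on version B (the rewrite author's own statement) =====
-- stated objective: alternative
-- what changed: Replaces A's two sequential filter-then-max scans over known_mcps (one per separator) with a single loop holding two running-best accumulators, one for '__' and one for '_', returning the '__' best if present.
import Mathlib
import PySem

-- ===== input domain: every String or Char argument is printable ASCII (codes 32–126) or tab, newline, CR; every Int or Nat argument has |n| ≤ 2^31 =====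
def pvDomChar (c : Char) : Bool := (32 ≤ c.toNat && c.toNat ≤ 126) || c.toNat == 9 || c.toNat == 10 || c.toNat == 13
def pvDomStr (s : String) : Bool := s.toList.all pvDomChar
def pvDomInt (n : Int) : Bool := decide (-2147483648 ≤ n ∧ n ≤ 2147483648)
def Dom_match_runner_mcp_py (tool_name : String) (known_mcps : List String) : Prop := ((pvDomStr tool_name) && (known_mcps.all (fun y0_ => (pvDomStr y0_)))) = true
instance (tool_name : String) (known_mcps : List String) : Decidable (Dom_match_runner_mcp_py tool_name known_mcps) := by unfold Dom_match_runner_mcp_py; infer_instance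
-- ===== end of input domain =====

-- B fuses A's two sequential filter-then-max scans (one per separator) into a single
-- pass over known_mcps keeping two running-best candidates; same results, no intermediate lists.


-- ===== PORT A =====
-- the per-element condition of A's list comprehension: tool_name.startswith(m+sep) and len(tool_name) > len(m)+len(sep)
def mcpCand (tool_name sep m : String) : Bool :=
  PySem.Str.startswith tool_name (m ++ sep) &&
    decide (PySem.Str.len tool_name > PySem.Str.len m + PySem.Str.len sep)

-- A's 'for sep in ("__", "_")' loop: build candidates, return max by len if nonempty
def mrAux (tool_name : String) (known_mcps : List String) : List String → Option String
  | [] => none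
  | sep :: rest =>
    let candidates := known_mcps.filter (fun m => mcpCand tool_name sep m)
    if candidates.isEmpty then mrAux tool_name known_mcps rest
    else PySem.List.max? candidates (fun m => PySem.Str.len m)

def match_runner_mcp_py (tool_name : String) (known_mcps : List String) : Option String :=
  if PySem.Str.len tool_name == 0 || known_mcps.isEmpty then none
  else mrAux tool_name known_mcps ["__", "_"]

-- ===== PORT B =====
def mrDblCond (tool_name m : String) : Bool :=
  PySem.Str.startswith tool_name (m ++ "__") && decide (PySem.Str.len m + 2 < PySem.Str.len tool_name)

def mrSglCond (tool_name m : String) : Bool :=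
  PySem.Str.startswith tool_name (m ++ "_") && decide (PySem.Str.len m + 1 < PySem.Str.len tool_name)

-- 'if best is None or len(m) > len(best): best = m'
def mrUpd (best : Option String) (m : String) : Option String :=
  match best with
  | none => some m
  | some b => if PySem.Str.len b < PySem.Str.len m then some m else some b

def match_runner_mcp_py_alt (tool_name : String) (known_mcps : List String) : Option String :=
  if PySem.Str.len tool_name == 0 || known_mcps.isEmpty then none
  else
    let r := known_mcps.foldl
      (fun acc m =>
        (if mrDblCond tool_name m then mrUpd acc.1 m else acc.1,
         if mrSglCond tool_name m then mrUpd acc.2 m else acc.2))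
      (none, none)
    match r.1 with
    | some b => some b
    | none => r.2

-- ===== PRECONDITION & SPEC =====
def Spec_match_runner_mcp_py (tool_name : String) (known_mcps : List String) (out : Option String) : Prop := out = match_runner_mcp_py_alt tool_name known_mcps
instance (tool_name : String) (known_mcps : List String) (out : Option String) : Decidable (Spec_match_runner_mcp_py tool_name known_mcps out) := by unfold Spec_match_runner_mcp_py; infer_instance

-- ===== CLAIM (what is proved, stated in full; the proofs are below) =====
def Claim_equal_match_runner_mcp_py : Prop := ∀ (tool_name : String) (known_mcps : List String), Dom_match_runner_mcp_py tool_name known_mcps → Spec_match_runner_mcp_py tool_name known_mcps (match_runner_mcp_py tool_name known_mcps)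

-- ===== LEMMAS AND PROOFS =====

-- B's conditions agree with A's comprehension condition at the two separator literals
theorem cand_dbl (t m : String) : mcpCand t "__" m = mrDblCond t m := by
  unfold mcpCand mrDblCond
  rw [show PySem.Str.len "__" = 2 from by decide]

theorem cand_sgl (t m : String) : mcpCand t "_" m = mrSglCond t m := by
  unfold mcpCand mrSglCond
  rw [show PySem.Str.len "_" = 1 from by decide]

-- B's guarded running-best fold over the whole list is A's max-by-len of the filtered list
theorem fold_filter_max (p : String → Bool) (xs : List String) :
    xs.foldl (fun acc m => if p m then mrUpd acc m else acc) none
      = PySem.List.max? (xs.filter p) (fun m => PySem.Str.len m) := by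
  rw [PySem.List.max?, List.foldl_filter]
  congr 1
  funext a m
  cases a <;> simp [mrUpd]

theorem match_runner_mcp_py_spec : Claim_equal_match_runner_mcp_py := by
  intro t ks _
  show match_runner_mcp_py t ks = match_runner_mcp_py_alt t ks
  unfold match_runner_mcp_py match_runner_mcp_py_alt
  cases hg : (PySem.Str.len t == 0 || ks.isEmpty) with
  | true => simp
  | false =>
    simp only [Bool.false_eq_true, if_false]
    rw [PySem.List.foldl_prod_mk
          (fun a m => if mrDblCond t m then mrUpd a m else a)
          (fun a m => if mrSglCond t m then mrUpd a m else a)]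
    rw [fold_filter_max, fold_filter_max]
    unfold mrAux mrAux mrAux
    simp only [cand_dbl, cand_sgl]
    by_cases h1 : ks.filter (fun m => mrDblCond t m) = []
    · rw [if_pos (by simp [h1]),
        (PySem.List.max?_eq_none_iff (ks.filter (fun m => mrDblCond t m)) _).mpr h1]
      by_cases h2 : ks.filter (fun m => mrSglCond t m) = []
      · rw [if_pos (by simp [h2]),
          (PySem.List.max?_eq_none_iff (ks.filter (fun m => mrSglCond t m)) _).mpr h2]
      · rw [if_neg (by simp [h2])]
    · rw [if_neg (by simp [h1])]
      rcases hm : PySem.List.max? (ks.filter (fun m => mrDblCond t m)) (fun m => PySem.Str.len m) with _ | b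
      · exact absurd ((PySem.List.max?_eq_none_iff _ _).mp hm) h1
      · rfl
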